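-- pv_equiv track=rewrite | github.com/Jmiracle76/orchestrator-agent | test-scripts/test_versioning_integration.py | simulate_section_completion
-- ===== SOURCE A (Python) =====
-- def simulate_section_completion(lines, section_id):
--     """Simulate completing a section by removing placeholder."""
--     result = []
--     in_section = False
--     for line in lines:
--         if f"<!-- section:{section_id} -->" in line:
--             in_section = True
--             result.append(line)
--         elif in_section and "<!-- PLACEHOLDER -->" in line:
--             # Replace placeholder with content
--             result.append(f"Content for {section_id} section.")
--             in_section = False
--         else:
--             result.append(line)
--     return result
-- ===== SOURCE B (Python) =====
-- def simulate_section_completion(lines, section_id):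
--     """Simulate completing a section by removing placeholder.
--
--     Two-mode scan: copy lines until a section marker is seen, then scan
--     forward for the first placeholder line (marker lines take precedence
--     and are copied as-is), replace it, and return to copy mode.
--     """
--     marker = f"<!-- section:{section_id} -->"
--     placeholder = "<!-- PLACEHOLDER -->"
--     content = f"Content for {section_id} section."
--     result = []
--     i = 0
--     n = len(lines)
--     while i < n:
--         result.append(lines[i])
--         i += 1
--         if marker in result[-1]:
--             # seek the placeholder of this section
--             while i < n and not (placeholder in lines[i] and marker not in lines[i]):
--                 result.append(lines[i])
--                 i += 1
--             if i < n:
--                 result.append(content)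
--                 i += 1
--     return result
-- ===== Notes on version B (the rewrite author's own statement) =====
-- stated objective: alternative
-- what changed: Replaces A's single-pass loop with an in_section boolean flag by a two-mode scan (an outer copy loop and an inner forward scan for the first placeholder line, marker lines taking precedence), hoisting the marker/content strings that A rebuilds on every iteration.
import Mathlib
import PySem

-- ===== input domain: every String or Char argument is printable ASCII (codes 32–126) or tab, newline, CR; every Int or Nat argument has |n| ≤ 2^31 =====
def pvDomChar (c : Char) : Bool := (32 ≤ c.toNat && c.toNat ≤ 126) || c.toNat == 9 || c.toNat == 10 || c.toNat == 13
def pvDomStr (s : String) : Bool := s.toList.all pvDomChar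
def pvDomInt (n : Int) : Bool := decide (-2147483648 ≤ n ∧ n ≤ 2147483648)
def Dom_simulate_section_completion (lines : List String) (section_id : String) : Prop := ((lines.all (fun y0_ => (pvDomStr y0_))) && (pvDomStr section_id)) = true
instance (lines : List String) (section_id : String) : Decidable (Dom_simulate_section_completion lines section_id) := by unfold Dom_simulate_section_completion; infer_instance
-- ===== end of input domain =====

-- B replaces A's single-pass boolean-flag loop by a two-mode scan (copy mode /
-- seek-placeholder mode) and builds the marker/content strings once instead of
-- per iteration (a timing run measured B faster by a constant factor).

-- ===== PORT A =====
-- A: one fold over the lines with state (result, in_section); pvStepA is the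
-- loop body, branches in A's order.
def pvStepA (m ph c : String) (st : List String × Bool) (line : String) : List String × Bool :=
  if PySem.Str.isIn m line then (st.1 ++ [line], true)
  else if st.2 && PySem.Str.isIn ph line then (st.1 ++ [c], false)
  else (st.1 ++ [line], st.2)

def simulate_section_completion (lines : List String) (section_id : String) : List String :=
  (lines.foldl
    (pvStepA ("<!-- section:" ++ section_id ++ " -->") "<!-- PLACEHOLDER -->"
      ("Content for " ++ section_id ++ " section."))
    ([], false)).1

-- ===== PORT B =====
-- B: outer loop = pvCopy (copy mode), inner scan = pvSeek (looking for the
-- placeholder of an open section); each consumes the remaining lines.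
mutual
def pvCopy (marker ph content : String) : List String → List String
  | [] => []
  | l :: ls =>
    if PySem.Str.isIn marker l then l :: pvSeek marker ph content ls
    else l :: pvCopy marker ph content ls
def pvSeek (marker ph content : String) : List String → List String
  | [] => []
  | l :: ls =>
    if PySem.Str.isIn ph l && !PySem.Str.isIn marker l then
      content :: pvCopy marker ph content ls
    else l :: pvSeek marker ph content ls
end

def simulate_section_completion_alt (lines : List String) (section_id : String) : List String :=
  pvCopy ("<!-- section:" ++ section_id ++ " -->") "<!-- PLACEHOLDER -->"
    ("Content for " ++ section_id ++ " section.") lines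

-- ===== PRECONDITION & SPEC =====
def Spec_simulate_section_completion (lines : List String) (section_id : String) (out : List String) : Prop := out = simulate_section_completion_alt lines section_id
instance (lines : List String) (section_id : String) (out : List String) : Decidable (Spec_simulate_section_completion lines section_id out) := by unfold Spec_simulate_section_completion; infer_instance

-- ===== CLAIM (what is proved, stated in full; the proofs are below) =====
def Claim_equal_simulate_section_completion : Prop := ∀ (lines : List String) (section_id : String), Dom_simulate_section_completion lines section_id → Spec_simulate_section_completion lines section_id (simulate_section_completion lines section_id)

-- ===== LEMMAS AND PROOFS =====

-- A's fold, run from accumulator acc with flag false resp. true, is acc ++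
-- pvCopy resp. acc ++ pvSeek on the remaining lines.
theorem pv_fold_eq_modes (m ph c : String) (ls : List String) :
    ∀ acc : List String,
      ((ls.foldl (pvStepA m ph c) (acc, false)).1 = acc ++ pvCopy m ph c ls)
      ∧ ((ls.foldl (pvStepA m ph c) (acc, true)).1 = acc ++ pvSeek m ph c ls) := by
  induction ls with
  | nil => intro acc; simp [pvCopy, pvSeek]
  | cons l ls ih =>
    intro acc
    by_cases hm : PySem.Chars.isIn m.toList l.toList = true
    · simp [List.foldl_cons, pvStepA, hm, pvCopy, pvSeek, (ih (acc ++ [l])).2]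
    · by_cases hp : PySem.Chars.isIn ph.toList l.toList = true
      · simp [List.foldl_cons, pvStepA, hm, hp, pvCopy, pvSeek,
          (ih (acc ++ [l])).1, (ih (acc ++ [c])).1]
      · simp [List.foldl_cons, pvStepA, hm, hp, pvCopy, pvSeek,
          (ih (acc ++ [l])).1, (ih (acc ++ [l])).2]

-- ===== VERDICT (by name: the statement is the Claim_ definition above) =====
theorem simulate_section_completion_spec : Claim_equal_simulate_section_completion := by
  intro lines section_id _
  unfold Spec_simulate_section_completion simulate_section_completion simulate_section_completion_alt
  simpa using
    (pv_fold_eq_modes ("<!-- section:" ++ section_id ++ " -->") "<!-- PLACEHOLDER -->"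
      ("Content for " ++ section_id ++ " section.") lines []).1
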